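-- pv_equiv track=rewrite | github.com/colossusofNero/CaddyAI | src/training/trainer.py | _entities_to_labels
-- ===== SOURCE A (Python) =====
-- from typing import Dict, List, Tuple, Optional, Any
--
-- def _entities_to_labels(entities: List[Tuple], tokens: List[str]) -> List[str]:
--     """Convert entity predictions to label sequence"""
--     labels = ["O"] * len(tokens)
--
--     for token, label, confidence in entities:
--         # Find token position
--         for i, t in enumerate(tokens):
--             if t == token:
--                 labels[i] = label
--                 break
--
--     return labels
-- ===== SOURCE B (Python) =====
-- def _entities_to_labels(entities, tokens):
--     """Convert entity predictions to label sequence"""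
--     first_label = {}
--     for token, label, confidence in entities:
--         first_label[token] = label
--
--     out = []
--     seen = set()
--     for t in tokens:
--         if t in first_label and t not in seen:
--             out.append(first_label[t])
--             seen.add(t)
--         else:
--             out.append("O")
--     return out
-- ===== Notes on version B (the rewrite author's own statement) =====
-- stated objective: faster
-- what changed: Replaced the per-entity inner scan over tokens by a token->label dict built once (last entity wins) plus a single pass over tokens with a seen-set so only each token's first occurrence is labeled.
import Mathlib
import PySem

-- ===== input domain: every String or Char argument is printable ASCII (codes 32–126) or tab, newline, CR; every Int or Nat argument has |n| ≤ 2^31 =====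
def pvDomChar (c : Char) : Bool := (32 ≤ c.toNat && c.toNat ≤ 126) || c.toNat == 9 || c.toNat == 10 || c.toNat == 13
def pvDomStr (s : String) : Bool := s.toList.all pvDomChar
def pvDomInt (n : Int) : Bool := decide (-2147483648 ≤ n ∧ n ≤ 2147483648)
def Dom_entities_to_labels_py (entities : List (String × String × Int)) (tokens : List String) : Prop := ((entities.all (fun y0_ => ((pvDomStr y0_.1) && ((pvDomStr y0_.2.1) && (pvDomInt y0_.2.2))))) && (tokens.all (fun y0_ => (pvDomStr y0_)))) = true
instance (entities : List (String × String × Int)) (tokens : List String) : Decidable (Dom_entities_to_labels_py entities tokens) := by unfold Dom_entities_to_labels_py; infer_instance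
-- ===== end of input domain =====

-- B replaces A's per-entity inner scan by a token->label dict built once plus a single
-- seen-set pass over tokens (objective: faster, O(e+t) instead of O(e*t)).

-- ===== PORT A =====
-- inner loop 'for i, t in enumerate(tokens): if t == token: … break'
def pvFindFrom (ts : List String) (tok : String) (i : Nat) : Option Nat :=
  match ts with
  | [] => none
  | t :: rest => if t = tok then some i else pvFindFrom rest tok (i + 1)

def entities_to_labels_py (entities : List (String × String × Int)) (tokens : List String) : List String :=
  entities.foldl
    (fun labels e =>
      match pvFindFrom tokens e.1 0 with
      | some i => labels.set i e.2.1
      | none => labels)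
    (List.replicate tokens.length "O")

-- ===== PORT B =====
-- 'for token, label, confidence in entities: first_label[token] = label'
def pvBuildIndex (entities : List (String × String × Int)) : PySem.Dict String String :=
  entities.foldl (fun d e => d.insert e.1 e.2.1) PySem.Dict.empty

-- 'for t in tokens: if t in first_label and t not in seen: out.append(first_label[t]); seen.add(t) else: out.append("O")'
def pvEmit (d : PySem.Dict String String) (ts : List String) (seen : PySem.Set String) : List String :=
  match ts with
  | [] => []
  | t :: rest =>
    if d.contains t && !(PySem.Set.contains seen t) then
      d.getD t "O" :: pvEmit d rest (PySem.Set.add seen t)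
    else
      "O" :: pvEmit d rest seen

def entities_to_labels_py_alt (entities : List (String × String × Int)) (tokens : List String) : List String :=
  pvEmit (pvBuildIndex entities) tokens PySem.Set.empty

-- ===== PRECONDITION & SPEC =====
def Spec_entities_to_labels_py (entities : List (String × String × Int)) (tokens : List String) (out : List String) : Prop := out = entities_to_labels_py_alt entities tokens
instance (entities : List (String × String × Int)) (tokens : List String) (out : List String) : Decidable (Spec_entities_to_labels_py entities tokens out) := by unfold Spec_entities_to_labels_py; infer_instance

-- ===== CLAIM (what is proved, stated in full; the proofs are below) =====
def Claim_equal_entities_to_labels_py : Prop := ∀ (entities : List (String × String × Int)) (tokens : List String), Dom_entities_to_labels_py entities tokens → Spec_entities_to_labels_py entities tokens (entities_to_labels_py entities tokens)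

-- ===== LEMMAS AND PROOFS =====

-- label of the LAST entity mentioning t, if any
def pvLastLabel (es : List (String × String × Int)) (t : String) : Option String :=
  es.foldl (fun acc e => if e.1 = t then some e.2.1 else acc) none

theorem pvLastLabel_concat (es : List (String × String × Int)) (e : String × String × Int) (t : String) :
    pvLastLabel (es ++ [e]) t = if e.1 = t then some e.2.1 else pvLastLabel es t := by
  simp [pvLastLabel]

-- findFrom facts
theorem pvFindFrom_shift (ts : List String) (tok : String) (k : Nat) :
    pvFindFrom ts tok (k + 1) = (pvFindFrom ts tok k).map (· + 1) := by
  induction ts generalizing k with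
  | nil => rfl
  | cons t rest ih =>
      simp only [pvFindFrom]
      split
      · rfl
      · exact ih (k + 1)

theorem pvFindFrom_none (ts : List String) (tok : String) (h : pvFindFrom ts tok 0 = none) : tok ∉ ts := by
  induction ts with
  | nil => simp
  | cons t rest ih =>
      simp only [pvFindFrom] at h
      split at h
      · simp at h
      · rw [pvFindFrom_shift] at h
        simp only [Option.map_eq_none_iff] at h
        rename_i hne
        simp only [List.mem_cons, not_or]
        exact ⟨fun he => hne he.symm, ih h⟩

theorem pvFindFrom_some_spec (ts : List String) (tok : String) (j : Nat)
    (h : pvFindFrom ts tok 0 = some j) :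
    ∃ hj : j < ts.length, ts[j] = tok ∧ tok ∉ ts.take j := by
  induction ts generalizing j with
  | nil => simp [pvFindFrom] at h
  | cons t rest ih =>
      simp only [pvFindFrom] at h
      split at h
      · rename_i heq
        obtain rfl : j = 0 := by simpa using h.symm
        exact ⟨by simp, by simpa using heq, by simp⟩
      · rename_i hne
        rw [pvFindFrom_shift] at h
        obtain ⟨j', hj', rfl⟩ := Option.map_eq_some_iff.mp h
        obtain ⟨hlt, hget, hnot⟩ := ih j' hj'
        refine ⟨by simpa using Nat.succ_lt_succ hlt, by simpa using hget, ?_⟩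
        simp only [List.take_succ_cons, List.mem_cons, not_or]
        exact ⟨fun he => hne (Eq.symm he), hnot⟩

theorem pvFindFrom_first (ts : List String) (tok : String) (i : Nat)
    (hi : i < ts.length) (hget : ts[i] = tok) (hnot : tok ∉ ts.take i) :
    pvFindFrom ts tok 0 = some i := by
  induction ts generalizing i with
  | nil => simp at hi
  | cons t rest ih =>
      cases i with
      | zero =>
          simp at hget
          simp [pvFindFrom, hget]
      | succ j =>
          simp only [List.take_succ_cons, List.mem_cons, not_or] at hnot
          simp only [pvFindFrom, if_neg (fun h : t = tok => hnot.1 (Eq.symm h))]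
          rw [pvFindFrom_shift]
          rw [ih j (by simpa using Nat.lt_of_succ_lt_succ hi) (by simpa using hget) hnot.2]
          rfl

-- A: length invariant
theorem pvA_length (es : List (String × String × Int)) (tokens : List String) :
    (entities_to_labels_py es tokens).length = tokens.length := by
  unfold entities_to_labels_py
  induction es using List.reverseRecOn with
  | nil => simp
  | append_singleton es e ih =>
      rw [List.foldl_append]
      simp only [List.foldl_cons, List.foldl_nil]
      split <;> simp [ih]

-- A: pointwise characterisation
theorem pvA_get (es : List (String × String × Int)) (tokens : List String) (i : Nat)
    (hi : i < tokens.length) (hlen : i < (entities_to_labels_py es tokens).length) :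
    (entities_to_labels_py es tokens)[i] =
      if pvFindFrom tokens tokens[i] 0 = some i then (pvLastLabel es tokens[i]).getD "O" else "O" := by
  induction es using List.reverseRecOn with
  | nil =>
      simp [entities_to_labels_py, pvLastLabel]
  | append_singleton es e ih =>
      have hlen' : i < (entities_to_labels_py es tokens).length := by
        rw [pvA_length]; exact hi
      have hstep : entities_to_labels_py (es ++ [e]) tokens =
          match pvFindFrom tokens e.1 0 with
          | some j => (entities_to_labels_py es tokens).set j e.2.1
          | none => entities_to_labels_py es tokens := by
        unfold entities_to_labels_py
        rw [List.foldl_append]; rfl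
      rw [pvLastLabel_concat]
      cases hfind : pvFindFrom tokens e.1 0 with
      | none =>
          have hne : tokens[i] ≠ e.1 := by
            intro he
            exact pvFindFrom_none tokens e.1 hfind (he ▸ List.getElem_mem hi)
          simp only [hstep, hfind]
          rw [ih hlen', if_neg (fun h : e.1 = tokens[i] => hne (Eq.symm h))]
      | some j =>
          obtain ⟨hj, hjget, hjnot⟩ := pvFindFrom_some_spec tokens e.1 j hfind
          simp only [hstep, hfind]
          rw [List.getElem_set]
          by_cases hij : j = i
          · subst hij
            have htok : tokens[j] = e.1 := hjget
            rw [if_pos rfl, htok, if_pos (htok ▸ hfind), if_pos rfl]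
            rfl
          · rw [if_neg hij, ih hlen']
            by_cases htok : tokens[i] = e.1
            · -- tokens[i] = e.1 but its first occurrence is j ≠ i: both sides "O"
              have hcond : pvFindFrom tokens tokens[i] 0 = some j := htok ▸ hfind
              have hne : pvFindFrom tokens tokens[i] 0 ≠ some i := by
                rw [hcond]; intro hc; exact hij (by simpa using hc)
              rw [if_neg hne, if_neg hne]
            · rw [if_neg (fun h : e.1 = tokens[i] => htok (Eq.symm h))]

-- dict lookup = last label
theorem pvBuildIndex_get (es : List (String × String × Int)) (t : String) :
    (pvBuildIndex es).get? t = pvLastLabel es t := by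
  unfold pvBuildIndex pvLastLabel
  have h : ∀ (d : PySem.Dict String String),
      (es.foldl (fun d e => d.insert e.1 e.2.1) d).get? t =
        es.foldl (fun acc e => if e.1 = t then some e.2.1 else acc) (d.get? t) := by
    induction es with
    | nil => intro d; rfl
    | cons e rest ih =>
        intro d
        simp only [List.foldl_cons]
        rw [ih]
        congr 1
        rw [PySem.Dict.get?_insert]
        by_cases h : e.1 = t
        · simp [h]
        · rw [if_neg (fun he => h (Eq.symm he)), if_neg h]
  exact h PySem.Dict.empty

-- B loop: pointwise characterisation
theorem pvEmit_length (d : PySem.Dict String String) (ts : List String) (seen : PySem.Set String) :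
    (pvEmit d ts seen).length = ts.length := by
  induction ts generalizing seen with
  | nil => rfl
  | cons t rest ih =>
      simp only [pvEmit]
      split <;> simp [ih]

theorem pvEmit_get (d : PySem.Dict String String) (ts : List String) (seen : PySem.Set String)
    (i : Nat) (hi : i < ts.length) (hlen : i < (pvEmit d ts seen).length) :
    (pvEmit d ts seen)[i] =
      if d.contains ts[i] = true ∧ ts[i] ∉ seen ∧ ts[i] ∉ ts.take i then d.getD ts[i] "O" else "O" := by
  induction ts generalizing seen i with
  | nil => simp at hi
  | cons t rest ih =>
      by_cases hb : d.contains t = true ∧ t ∉ seen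
      · have hbb : (d.contains t && !(PySem.Set.contains seen t)) = true := by
          simp [hb.1, hb.2]
        have hlist : pvEmit d (t :: rest) seen = d.getD t "O" :: pvEmit d rest (PySem.Set.add seen t) := by
          simp only [pvEmit]; rw [if_pos hbb]
        rw [List.getElem_of_eq hlist hlen]
        cases i with
        | zero =>
            simp only [List.getElem_cons_zero, List.take_zero, List.not_mem_nil, not_false_iff, and_true]
            rw [if_pos ⟨hb.1, hb.2⟩]
        | succ j =>
            have hj : j < rest.length := Nat.lt_of_succ_lt_succ hi
            have hjl : j < (pvEmit d rest (PySem.Set.add seen t)).length := by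
              rw [pvEmit_length]; exact hj
            simp only [List.getElem_cons_succ]
            rw [ih (PySem.Set.add seen t) j hj hjl]
            have hmem : rest[j] ∉ PySem.Set.add seen t ↔ (rest[j] ∉ seen ∧ rest[j] ≠ t) := by
              rw [PySem.Set.mem_add]; tauto
            simp only [List.take_succ_cons, List.mem_cons, not_or]
            by_cases hc : d.contains rest[j] = true ∧ rest[j] ∉ PySem.Set.add seen t ∧ rest[j] ∉ rest.take j
            · rw [if_pos hc, if_pos ⟨hc.1, (hmem.mp hc.2.1).1, (hmem.mp hc.2.1).2, hc.2.2⟩]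
            · rw [if_neg hc, if_neg (fun h => hc ⟨h.1, hmem.mpr ⟨h.2.1, h.2.2.1⟩, h.2.2.2⟩)]
      · have hbb : (d.contains t && !(PySem.Set.contains seen t)) = false := by
          by_cases h1 : d.contains t = true
          · have h2 : t ∈ seen := by
              by_contra h2; exact hb ⟨h1, h2⟩
            simp [h1, h2]
          · simp [Bool.eq_false_iff.mpr h1]
        have hlist : pvEmit d (t :: rest) seen = "O" :: pvEmit d rest seen := by
          simp only [pvEmit, hbb, Bool.false_eq_true, if_false]
        rw [List.getElem_of_eq hlist hlen]
        cases i with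
        | zero =>
            simp only [List.getElem_cons_zero, List.take_zero, List.not_mem_nil, not_false_iff, and_true]
            rw [if_neg (fun h => hb ⟨h.1, h.2⟩)]
        | succ j =>
            have hj : j < rest.length := Nat.lt_of_succ_lt_succ hi
            have hjl : j < (pvEmit d rest seen).length := by
              rw [pvEmit_length]; exact hj
            simp only [List.getElem_cons_succ]
            rw [ih seen j hj hjl]
            simp only [List.take_succ_cons, List.mem_cons, not_or]
            by_cases hc : d.contains rest[j] = true ∧ rest[j] ∉ seen ∧ rest[j] ∉ rest.take j
            · have hne : rest[j] ≠ t := by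
                intro he
                exact hb ⟨he ▸ hc.1, he ▸ hc.2.1⟩
              rw [if_pos hc, if_pos ⟨hc.1, hc.2.1, hne, hc.2.2⟩]
            · rw [if_neg hc, if_neg (fun h => hc ⟨h.1, h.2.1, h.2.2.2⟩)]

-- ===== VERDICT (by name: the statement is the Claim_ definition above) =====
theorem entities_to_labels_py_spec : Claim_equal_entities_to_labels_py := by
  intro es tokens _
  unfold Spec_entities_to_labels_py entities_to_labels_py_alt
  apply List.ext_getElem
  · rw [pvA_length, pvEmit_length]
  · intro i hA hB
    have hi : i < tokens.length := by rw [pvA_length] at hA; exact hA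
    rw [pvA_get es tokens i hi hA, pvEmit_get _ tokens PySem.Set.empty i hi hB]
    rw [PySem.Dict.contains_eq_isSome_get?, pvBuildIndex_get]
    rw [PySem.Dict.getD_eq_get?_getD, pvBuildIndex_get]
    by_cases hfirst : tokens[i] ∉ tokens.take i
    · by_cases hsome : (pvLastLabel es tokens[i]).isSome = true
      · rw [if_pos (pvFindFrom_first tokens tokens[i] i hi rfl hfirst),
            if_pos ⟨hsome, List.not_mem_nil, hfirst⟩]
      · rw [if_pos (pvFindFrom_first tokens tokens[i] i hi rfl hfirst),
            if_neg (fun h => hsome h.1)]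
        cases h : pvLastLabel es tokens[i] with
        | none => rfl
        | some l => rw [h] at hsome; simp at hsome
    · rw [not_not] at hfirst
      have hne : pvFindFrom tokens tokens[i] 0 ≠ some i := by
        intro h
        obtain ⟨_, _, hnot⟩ := pvFindFrom_some_spec tokens tokens[i] i h
        exact hnot hfirst
      rw [if_neg hne, if_neg (fun h => h.2.2 hfirst)]
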